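-- pv_equiv track=rewrite | github.com/hyung6370/cppAtoZ | Programmers/Lv_0/배열의깊이에따라다른연산하기.py | solution
-- ===== SOURCE A (Python) =====
-- def solution(arr, n):
--     answer = []
--     if len(arr) % 2 == 1:
--         for i in range(len(arr)):
--             if i % 2 == 0:
--                 answer.append(arr[i]+n)
--             else:
--                 answer.append(arr[i])
--     else:
--         for i in range(len(arr)):
--             if i % 2 == 1:
--                 answer.append(arr[i]+n)
--             else:
--                 answer.append(arr[i])
--
--     return answer
-- ===== SOURCE B (Python) =====
-- def solution(arr, n):
--     start = 0 if len(arr) % 2 == 1 else 1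
--     answer = list(arr)
--     for i in range(start, len(arr), 2):
--         answer[i] += n
--     return answer
-- ===== Notes on version B (the rewrite author's own statement) =====
-- stated objective: alternative
-- what changed: Replaces A's duplicated index loops over range(len(arr)) with a per-element parity branch by a shallow copy of arr followed by a stride-2 in-place update over only the affected positions.
import Mathlib
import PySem

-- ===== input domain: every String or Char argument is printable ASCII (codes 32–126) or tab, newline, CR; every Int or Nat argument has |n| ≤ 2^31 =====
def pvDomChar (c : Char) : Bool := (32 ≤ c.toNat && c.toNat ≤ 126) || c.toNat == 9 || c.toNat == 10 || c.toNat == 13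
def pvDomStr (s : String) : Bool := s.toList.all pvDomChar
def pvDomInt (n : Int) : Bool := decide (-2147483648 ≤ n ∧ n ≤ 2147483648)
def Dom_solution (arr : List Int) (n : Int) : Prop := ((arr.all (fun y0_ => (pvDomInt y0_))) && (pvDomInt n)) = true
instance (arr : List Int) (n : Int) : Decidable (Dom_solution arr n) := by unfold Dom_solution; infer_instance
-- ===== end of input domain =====

-- B replaces A's duplicated index loops with a per-element parity branch by a shallow copy of arr
-- followed by a stride-2 in-place update over only the affected positions (objective: alternative).

-- ===== PORT A =====
-- literal port: answer = []; branch on len(arr) % 2; for i in range(len(arr)): append arr[i]+n or arr[i]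
def solution (arr : List Int) (n : Int) : List Int :=
  if (arr.length : Int) % 2 == 1 then
    (PySem.List.pyRange 0 (arr.length : Int) 1).foldl
      (fun answer i =>
        if PySem.Int.mod i 2 == 0 then answer ++ [PySem.List.pyGetD arr i 0 + n]
        else answer ++ [PySem.List.pyGetD arr i 0]) []
  else
    (PySem.List.pyRange 0 (arr.length : Int) 1).foldl
      (fun answer i =>
        if PySem.Int.mod i 2 == 1 then answer ++ [PySem.List.pyGetD arr i 0 + n]
        else answer ++ [PySem.List.pyGetD arr i 0]) []

-- ===== PORT B =====
-- literal port of Source B: start from length parity; answer = list(arr); for i in range(start, len, 2): answer[i] += n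
def solution_alt (arr : List Int) (n : Int) : List Int :=
  let start : Int := if (arr.length : Int) % 2 == 1 then 0 else 1
  (PySem.List.pyRange start (arr.length : Int) 2).foldl
    (fun answer i => PySem.List.pySetD answer i (PySem.List.pyGetD answer i 0 + n)) arr

-- ===== PRECONDITION & SPEC =====
def Spec_solution (arr : List Int) (n : Int) (out : List Int) : Prop := out = solution_alt arr n
instance (arr : List Int) (n : Int) (out : List Int) : Decidable (Spec_solution arr n out) := by unfold Spec_solution; infer_instance

-- ===== CLAIM (what is proved, stated in full; the proofs are below) =====
def Claim_equal_solution : Prop := ∀ (arr : List Int) (n : Int), Dom_solution arr n → Spec_solution arr n (solution arr n)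

-- ===== LEMMAS AND PROOFS =====

-- A's foldl with the branch inside, re-shaped to a single append
theorem foldl_branch_eq_map (l : List Int) (c : Int → Bool) (f g : Int → Int) :
    l.foldl (fun answer i => if c i then answer ++ [f i] else answer ++ [g i]) ([] : List Int)
      = l.map (fun i => if c i then f i else g i) := by
  have hfun : (fun (answer : List Int) (i : Int) =>
      if c i then answer ++ [f i] else answer ++ [g i])
      = fun answer i => answer ++ [if c i then f i else g i] := by
    funext answer i; split <;> rfl
  rw [hfun, PySem.List.foldl_append_singleton_eq_map]
  simp

-- A's loop value as a map over List.range (r is the hit parity, 0 or 1)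
theorem solution_branch_eq (arr : List Int) (n : Int) (r : Int) :
    (PySem.List.pyRange 0 (arr.length : Int) 1).foldl
      (fun answer i =>
        if PySem.Int.mod i 2 == r then answer ++ [PySem.List.pyGetD arr i 0 + n]
        else answer ++ [PySem.List.pyGetD arr i 0]) []
      = (List.range arr.length).map
          (fun (k : Nat) => if (((k : Int) % 2) == r) then arr.getD k 0 + n else arr.getD k 0) := by
  rw [foldl_branch_eq_map, PySem.List.pyRange_one]
  simp only [sub_zero, Int.toNat_natCast, List.map_map]
  apply List.map_congr_left
  intro k _
  simp [Function.comp, PySem.List.pyGetD_natCast]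

-- B's loop: folding `answer[i] += n` over a Nodup list of in-range nonneg indices,
-- characterised position by position with getD
theorem foldl_setadd_getD (n : Int) (L : List Int) (xs : List Int)
    (hb : ∀ i ∈ L, 0 ≤ i ∧ i < (xs.length : Int)) (hnd : L.Nodup) :
    (L.foldl (fun answer i =>
        PySem.List.pySetD answer i (PySem.List.pyGetD answer i 0 + n)) xs).length = xs.length ∧
    ∀ j : Nat, (L.foldl (fun answer i =>
        PySem.List.pySetD answer i (PySem.List.pyGetD answer i 0 + n)) xs).getD j 0
      = if ((j : Int) ∈ L) then xs.getD j 0 + n else xs.getD j 0 := by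
  induction L generalizing xs with
  | nil => simp
  | cons i L' ih =>
      obtain ⟨hi0, hilt⟩ := hb i (List.mem_cons_self ..)
      have hnat : i.toNat < xs.length := by omega
      have hset : PySem.List.pySetD xs i (PySem.List.pyGetD xs i 0 + n)
          = xs.set i.toNat (xs.getD i.toNat 0 + n) := by
        rw [PySem.List.pySetD_of_nonneg xs _ hi0]
        congr 1
        rw [PySem.List.pyGetD_eq_getElem xs 0 hi0 hilt, List.getD_eq_getElem _ _ hnat]
      have hlen : (xs.set i.toNat (xs.getD i.toNat 0 + n)).length = xs.length :=
        List.length_set ..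
      have hb' : ∀ k ∈ L', 0 ≤ k ∧
          k < ((xs.set i.toNat (xs.getD i.toNat 0 + n)).length : Int) := by
        intro k hk; rw [hlen]; exact hb k (List.mem_cons_of_mem _ hk)
      obtain ⟨ihlen, ihget⟩ :=
        ih (xs.set i.toNat (xs.getD i.toNat 0 + n)) hb' hnd.of_cons
      have hnot : i ∉ L' := (List.nodup_cons.mp hnd).1
      have hgetset : ∀ m : Nat, (xs.set i.toNat (xs.getD i.toNat 0 + n)).getD m 0
          = if m = i.toNat then xs.getD m 0 + n else xs.getD m 0 := by
        intro m
        by_cases hm : m = i.toNat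
        · rw [if_pos hm, hm]
          have hm2 : i.toNat < (xs.set i.toNat (xs.getD i.toNat 0 + n)).length := by
            simpa [hlen] using hnat
          rw [List.getD_eq_getElem _ _ hm2, List.getElem_set]
          simp
        · rw [if_neg hm]
          have hne : i.toNat ≠ m := Ne.symm hm
          simp [List.getD, hne]
      refine ⟨?_, ?_⟩
      · simp only [List.foldl_cons, hset, ihlen, hlen]
      · intro j
        simp only [List.foldl_cons, hset, ihget j]
        rw [hgetset j]
        by_cases hjL : (j : Int) ∈ L'
        · have hjne : j ≠ i.toNat := fun h => hnot (by
            have : (j : Int) = i := by omega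
            exact this ▸ hjL)
          rw [if_pos hjL, if_neg hjne, if_pos (List.mem_cons_of_mem _ hjL)]
        · by_cases hji : (j : Int) = i
          · have hj : j = i.toNat := by omega
            have hmem : (j : Int) ∈ i :: L' := by
              rw [hji]; exact List.mem_cons_self ..
            rw [if_neg hjL, if_pos hj, if_pos hmem]
          · have hjne : j ≠ i.toNat := by omega
            have hnm : (j : Int) ∉ i :: L' := by
              simp [List.mem_cons, hji, hjL]
            rw [if_neg hjL, if_neg hjne, if_neg hnm]

-- the stride-2 range is duplicate-free and in bounds
theorem nodup_pyRange_two (a b : Int) : (PySem.List.pyRange a b 2).Nodup := by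
  rw [PySem.List.pyRange_of_pos a b (by omega)]
  exact List.Nodup.map (fun x y h => by omega) List.nodup_range

-- ===== VERDICT (by name: the statement is the Claim_ definition above) =====
theorem solution_spec : Claim_equal_solution := by
  intro arr n _
  unfold Spec_solution solution solution_alt
  by_cases hodd : (arr.length : Int) % 2 = 1
  · simp only [hodd, beq_self_eq_true, if_pos]
    rw [solution_branch_eq arr n 0]
    have hb : ∀ i ∈ PySem.List.pyRange 0 (arr.length : Int) 2,
        0 ≤ i ∧ i < (arr.length : Int) := by
      intro i hi
      have := (PySem.List.mem_pyRange_iff_of_pos (by omega) i).mp hi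
      exact ⟨this.1, this.2.1⟩
    obtain ⟨hlen, hget⟩ := foldl_setadd_getD n _ arr hb (nodup_pyRange_two _ _)
    apply List.ext_getElem (by simp [hlen])
    intro j hj1 hj2
    rw [← List.getD_eq_getElem _ 0 hj2, hget j]
    have hmem : ((j : Int) ∈ PySem.List.pyRange 0 (arr.length : Int) 2)
        ↔ ((j : Int) % 2 = 0) := by
      rw [PySem.List.mem_pyRange_iff_of_pos (by omega)]
      simp only [List.length_map, List.length_range] at hj1
      omega
    simp only [List.getElem_map, List.getElem_range]
    by_cases hp : (j : Int) % 2 = 0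
    · simp [hmem, hp]
    · simp [hmem, hp]
  · have heven : ((arr.length : Int) % 2 == 1) = false := by simp [hodd]
    simp only [heven, Bool.false_eq_true, if_neg, not_false_iff]
    rw [solution_branch_eq arr n 1]
    have hb : ∀ i ∈ PySem.List.pyRange 1 (arr.length : Int) 2,
        0 ≤ i ∧ i < (arr.length : Int) := by
      intro i hi
      have := (PySem.List.mem_pyRange_iff_of_pos (by omega) i).mp hi
      exact ⟨by omega, this.2.1⟩
    obtain ⟨hlen, hget⟩ := foldl_setadd_getD n _ arr hb (nodup_pyRange_two _ _)
    apply List.ext_getElem (by simp [hlen])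
    intro j hj1 hj2
    rw [← List.getD_eq_getElem _ 0 hj2, hget j]
    have hmem : ((j : Int) ∈ PySem.List.pyRange 1 (arr.length : Int) 2)
        ↔ ((j : Int) % 2 = 1) := by
      rw [PySem.List.mem_pyRange_iff_of_pos (by omega)]
      simp only [List.length_map, List.length_range] at hj1
      omega
    simp only [List.getElem_map, List.getElem_range]
    by_cases hp : (j : Int) % 2 = 1
    · simp [hmem, hp]
    · simp [hmem, hp]
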